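-- pv_equiv track=rewrite | github.com/csm5099/Algorithm_Pratice | week01/02_algorithm.py | solution
-- ===== SOURCE A (Python) =====
-- def solution(lottos, win_nums):
--
--     #count zeros for high score
--     zero_count=lottos.count(0)
--
--     #chage data type for deduplication
--     lottos_set=set(lottos)
--     win_nums_set=set(win_nums)
--
--     #remove zero because zero has been used before
--     lottos_set.discard(0)
--
--     #checking numbers of the lowest rank & highest rank
--     instersection = lottos_set & win_nums_set
--     matches_list=[]
--     matches_list.append(len(instersection))
--     matches_list.append(matches_list[0]+zero_count)
--
--     answer = []
--
--     for match in matches_list: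
--         rank = 1
--         for i in range(6,-1,-1):
--             if match == i:
--                 answer.insert(0,rank)
--                 break
--             if i==1:
--                 continue
--             rank+=1
--
--     return answer
-- ===== SOURCE B (Python) =====
-- def solution(lottos, win_nums):
--     zero_count = lottos.count(0)
--     matches = len((set(lottos) - {0}) & set(win_nums))
--     best = matches + zero_count
--     # closed-form rank; a match count above 6 (degenerate input) contributes nothing, as in A
--     return [min(7 - m, 6) for m in (best, matches) if m <= 6]
-- ===== Notes on version B (the rewrite author's own statement) =====
-- stated objective: simpler
-- what changed: Replaces the nested countdown range loop with break/continue and insert-at-front bookkeeping by the closed form rank(m) = min(7 - m, 6) applied in a single comprehension over (best, matches).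
import Mathlib
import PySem

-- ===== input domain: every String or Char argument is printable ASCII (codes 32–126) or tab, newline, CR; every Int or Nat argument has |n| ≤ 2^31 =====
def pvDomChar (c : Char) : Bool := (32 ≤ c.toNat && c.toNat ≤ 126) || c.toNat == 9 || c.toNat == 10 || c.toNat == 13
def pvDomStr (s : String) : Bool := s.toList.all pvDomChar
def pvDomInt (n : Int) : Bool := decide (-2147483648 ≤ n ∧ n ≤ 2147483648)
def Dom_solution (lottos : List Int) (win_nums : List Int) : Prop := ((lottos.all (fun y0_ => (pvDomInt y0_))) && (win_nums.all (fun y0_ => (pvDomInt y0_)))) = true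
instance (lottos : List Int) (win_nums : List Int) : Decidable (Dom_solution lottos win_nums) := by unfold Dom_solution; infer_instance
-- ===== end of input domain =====

-- B replaces A's nested countdown rank loop (break/continue, insert-at-front) by the
-- closed form rank(m) = min(7 - m, 6) in a single comprehension; objective: simpler.


-- ===== PORT A =====
-- inner loop: 'for i in range(6,-1,-1): if match == i: answer.insert(0,rank); break; if i==1: continue; rank += 1'
def solutionInnerLoop (m : Int) (is : List Int) (rank : Int) (answer : List Int) : List Int :=
  match is with
  | [] => answer
  | i :: rest =>
    if m = i then PySem.List.insert answer 0 rank
    else if i = 1 then solutionInnerLoop m rest rank answer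
    else solutionInnerLoop m rest (rank + 1) answer

def solution (lottos : List Int) (win_nums : List Int) : List Int :=
  let zero_count : Int := (PySem.List.count lottos 0 : Int)
  let lottos_set := PySem.Set.ofList lottos
  let win_nums_set := PySem.Set.ofList win_nums
  let lottos_set := PySem.Set.discard lottos_set 0
  let intersection := PySem.Set.inter lottos_set win_nums_set
  let matches_list : List Int := [(intersection.length : Int), (intersection.length : Int) + zero_count]
  matches_list.foldl (fun answer m => solutionInnerLoop m (PySem.List.pyRange 6 (-1) (-1)) 1 answer) []

-- ===== PORT B =====
def solution_alt (lottos : List Int) (win_nums : List Int) : List Int :=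
  let zero_count : Int := (PySem.List.count lottos 0 : Int)
  let matchesN : Int :=
    ((PySem.Set.inter (PySem.Set.diff (PySem.Set.ofList lottos) (PySem.Set.ofList [0]))
        (PySem.Set.ofList win_nums)).length : Int)
  let best : Int := matchesN + zero_count
  ([best, matchesN].filter (fun m => m ≤ 6)).map (fun m => min (7 - m) 6)

-- ===== PRECONDITION & SPEC =====
def Spec_solution (lottos : List Int) (win_nums : List Int) (out : List Int) : Prop := out = solution_alt lottos win_nums
instance (lottos : List Int) (win_nums : List Int) (out : List Int) : Decidable (Spec_solution lottos win_nums out) := by unfold Spec_solution; infer_instance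

-- ===== CLAIM (what is proved, stated in full; the proofs are below) =====
def Claim_equal_solution : Prop := ∀ (lottos : List Int) (win_nums : List Int), Dom_solution lottos win_nums → Spec_solution lottos win_nums (solution lottos win_nums)

-- ===== LEMMAS AND PROOFS =====
theorem pyRange_countdown : PySem.List.pyRange 6 (-1) (-1) = [6, 5, 4, 3, 2, 1, 0] := by
  rw [PySem.List.pyRange_neg_one]; rfl

theorem insert_zero_cons (xs : List Int) (v : Int) : PySem.List.insert xs 0 v = v :: xs := by
  simp only [PySem.List.insert, PySem.List.sliceIndices]
  norm_num

-- the inner loop computes the closed-form rank (for nonnegative match counts)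
theorem innerLoop_closed (m : Int) (hm : 0 ≤ m) (answer : List Int) :
    solutionInnerLoop m (PySem.List.pyRange 6 (-1) (-1)) 1 answer =
      if m ≤ 6 then min (7 - m) 6 :: answer else answer := by
  rw [pyRange_countdown]
  by_cases h6 : m = 6
  · subst h6; norm_num [solutionInnerLoop, insert_zero_cons]
  by_cases h5 : m = 5
  · subst h5; norm_num [solutionInnerLoop, insert_zero_cons]
  by_cases h4 : m = 4
  · subst h4; norm_num [solutionInnerLoop, insert_zero_cons]
  by_cases h3 : m = 3
  · subst h3; norm_num [solutionInnerLoop, insert_zero_cons]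
  by_cases h2 : m = 2
  · subst h2; norm_num [solutionInnerLoop, insert_zero_cons]
  by_cases h1 : m = 1
  · subst h1; norm_num [solutionInnerLoop, insert_zero_cons]
  by_cases h0 : m = 0
  · subst h0; norm_num [solutionInnerLoop, insert_zero_cons]
  · rw [if_neg (by omega)]
    norm_num [solutionInnerLoop, h6, h5, h4, h3, h2, h1, h0]

theorem discard_zero_eq_diff (s : List Int) :
    PySem.Set.discard s 0 = PySem.Set.diff s (PySem.Set.ofList [0]) := by
  unfold PySem.Set.discard PySem.Set.diff
  apply List.filter_congr; intro x _
  cases h : (x == (0 : Int)) <;> simp_all [PySem.Set.ofList]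

-- the two rank computations assembled the same way
theorem assemble (bv mv : Int) :
    (if bv ≤ 6 then min (7 - bv) 6 :: (if mv ≤ 6 then min (7 - mv) 6 :: ([] : List Int) else []) else (if mv ≤ 6 then min (7 - mv) 6 :: ([] : List Int) else [])) =
    ([bv, mv].filter (fun m => m ≤ 6)).map (fun m => min (7 - m) 6) := by
  by_cases h1 : bv ≤ 6 <;> by_cases h2 : mv ≤ 6 <;> simp [h1, h2]

-- ===== VERDICT (by name: the statement is the Claim_ definition above) =====
theorem solution_spec : Claim_equal_solution := by
  intro lottos win_nums _
  unfold Spec_solution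
  simp only [solution, solution_alt]
  rw [discard_zero_eq_diff]
  simp only [List.foldl]
  rw [innerLoop_closed _ (by positivity), innerLoop_closed _ (by positivity)]
  exact assemble _ _
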